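-- pv_equiv track=rewrite | github.com/desiprincess/bootcamp25 | capitulo6/d.py | flechaDown
-- ===== SOURCE A (Python) =====
-- def flechaDown(n):
--     linea = ['#'] * n
--     linea.append('\n')  # [e, e, e...,\n]
--     linea = "".join(linea)
--     if n == 1:
--         return linea
--     else:
--         return linea +flechaDown(n-1)
-- ===== SOURCE B (Python) =====
-- def flechaDown(n):
--     return "".join('#' * i + '\n' for i in range(n, 0, -1))
-- ===== Notes on version B (the rewrite author's own statement) =====
-- stated objective: simpler
-- what changed: Replaces A's recursion (each call building one row and re-concatenating the entire recursive tail) with a single generator-join over range(n,0,-1).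
import Mathlib
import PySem

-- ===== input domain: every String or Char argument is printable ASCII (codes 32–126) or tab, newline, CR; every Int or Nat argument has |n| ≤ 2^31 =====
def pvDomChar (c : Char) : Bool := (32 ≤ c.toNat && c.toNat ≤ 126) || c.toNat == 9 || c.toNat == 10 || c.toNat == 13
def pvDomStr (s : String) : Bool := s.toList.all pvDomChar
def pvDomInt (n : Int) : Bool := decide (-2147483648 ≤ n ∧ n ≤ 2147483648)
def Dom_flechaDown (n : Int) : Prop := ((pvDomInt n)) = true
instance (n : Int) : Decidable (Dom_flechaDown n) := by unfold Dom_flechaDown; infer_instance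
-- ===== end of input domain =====

-- B replaces A's recursive row-by-row concatenation with a single join over range(n,0,-1) (simpler, no recursion).


-- ===== PORT A =====
-- ['#'] * n; append '\n'; "".join; if n == 1 return it else return it ++ recurse(n-1).
-- The 'n ≤ 0' guard only makes the recursion total in Lean: Python diverges there (outside Pre_).
def flechaDown (n : Int) : String :=
  let linea := PySem.Str.join "" (List.replicate n.toNat "#" ++ ["\n"])
  if n = 1 then linea
  else if n ≤ 0 then linea
  else linea ++ flechaDown (n - 1)
termination_by n.toNat
decreasing_by omega

-- ===== PORT B =====
-- "".join('#' * i + '\n' for i in range(n, 0, -1))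
def flechaDown_alt (n : Int) : String :=
  PySem.Str.join ""
    ((PySem.List.pyRange n 0 (-1)).map
      (fun i => PySem.Str.join "" (List.replicate i.toNat "#") ++ "\n"))

-- ===== PRECONDITION & SPEC =====
-- A's recursion only reaches its base case n == 1 for positive n; for n ≤ 0 Python raises RecursionError.
def Pre_flechaDown (n : Int) : Prop := 1 ≤ n
instance (n : Int) : Decidable (Pre_flechaDown n) := by unfold Pre_flechaDown; infer_instance
def pvWitness_flechaDown : Int := (3)

def Spec_flechaDown (n : Int) (out : String) : Prop := out = flechaDown_alt n
instance (n : Int) (out : String) : Decidable (Spec_flechaDown n out) := by unfold Spec_flechaDown; infer_instance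

-- ===== CLAIM (what is proved, stated in full; the proofs are below) =====
def Claim_equal_flechaDown : Prop := ∀ (n : Int), Dom_flechaDown n → Pre_flechaDown n → Spec_flechaDown n (flechaDown n)

-- ===== LEMMAS AND PROOFS =====

-- "".join with empty separator is concatenation.
lemma join_empty (l : List (List Char)) : PySem.Chars.join [] l = l.flatten := by
  induction l with
  | nil => simp [PySem.Chars.join_nil]
  | cons p rest ih =>
    cases rest with
    | nil => simp [PySem.Chars.join_singleton]
    | cons q r => rw [PySem.Chars.join_cons_cons]; simp [ih]

lemma str_join_empty_cons (s : String) (l : List String) :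
    PySem.Str.join "" (s :: l) = s ++ PySem.Str.join "" l := by
  apply String.toList_inj.mp
  simp [PySem.Str.toList_join, join_empty]

-- One row of the arrow: A's "".join(['#']*m ++ ['\n']) equals B's '#'*m + '\n'.
lemma row_eq (m : Int) :
    PySem.Str.join "" (List.replicate m.toNat "#" ++ ["\n"])
      = PySem.Str.join "" (List.replicate m.toNat "#") ++ "\n" := by
  apply String.toList_inj.mp
  simp [PySem.Str.toList_join, join_empty]

lemma key (k : Nat) : ∀ (n : Int), n.toNat = k → 1 ≤ n → flechaDown n = flechaDown_alt n := by
  induction k using Nat.strong_induction_on with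
  | _ k ih =>
    intro n hk h1
    rw [flechaDown]
    by_cases he : n = 1
    · subst he
      unfold flechaDown_alt
      rw [PySem.List.pyRange_neg_one_cons (by norm_num),
          PySem.List.pyRange_neg_one_eq_nil (by norm_num), List.map_cons, List.map_nil,
          str_join_empty_cons, row_eq]
      apply String.toList_inj.mp
      simp [PySem.Str.toList_join, PySem.Chars.join_nil]
    · have h2 : 2 ≤ n := by omega
      simp only [if_neg he, if_neg (show ¬ n ≤ 0 by omega)]
      rw [ih (n - 1).toNat (by omega) (n - 1) rfl (by omega)]
      unfold flechaDown_alt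
      rw [PySem.List.pyRange_neg_one_cons (show (0:Int) < n by omega), List.map_cons,
          str_join_empty_cons, row_eq]

-- ===== VERDICT (by name: the statement is the Claim_ definition above) =====
theorem flechaDown_spec : Claim_equal_flechaDown := by
  intro n _ hp
  exact key n.toNat n rfl hp
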